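-- pv_equiv track=rewrite | github.com/Jaeyeop-Jung/CodingTest | 프로그래머스/Lv2/2회차/Lv2. 점프와 순간 이동.py | solution
-- ===== SOURCE A (Python) =====
-- def solution(n):
--     num = n
--     result = 0
--     while num != 0:
--         if num % 2 == 0:
--             num //= 2
--         else:
--             num -= 1
--             result += 1
--     return result
-- ===== SOURCE B (Python) =====
-- def solution(n):
--     result = 0
--     while n != 0:
--         n &= n - 1
--         result += 1
--     return result
-- ===== Notes on version B (the rewrite author's own statement) =====
-- stated objective: alternative
-- what changed: Replaces A's per-bit loop (halve when even, decrement-and-count when odd) with Kernighan's trick: clear the lowest set bit with n &= n-1, one iteration per set bit.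
import Mathlib
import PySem

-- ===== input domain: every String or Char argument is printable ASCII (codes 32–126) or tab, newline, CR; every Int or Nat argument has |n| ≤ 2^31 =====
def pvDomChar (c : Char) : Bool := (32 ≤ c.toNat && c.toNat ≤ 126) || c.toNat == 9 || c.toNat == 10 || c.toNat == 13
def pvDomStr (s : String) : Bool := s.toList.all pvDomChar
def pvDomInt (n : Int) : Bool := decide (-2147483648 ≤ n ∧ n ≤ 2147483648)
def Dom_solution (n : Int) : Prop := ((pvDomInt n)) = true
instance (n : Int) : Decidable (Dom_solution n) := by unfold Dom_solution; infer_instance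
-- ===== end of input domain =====

-- B replaces A's per-bit even/odd loop with Kernighan's n &= n-1, one iteration per set bit (return value only; A mutates nothing).

-- ===== PORT A =====
-- A's while loop; the `num ≤ 0` guard merges the Python exit `num == 0` with
-- num < 0, where Python's loop never terminates (excluded by Pre_solution).
def solutionGo (num result : Int) : Int :=
  if num ≤ 0 then result
  else if PySem.Int.mod num 2 = 0 then solutionGo (PySem.Int.floordiv num 2) result
  else solutionGo (num - 1) (result + 1)
termination_by num.toNat
decreasing_by
  · rw [PySem.Int.floordiv_eq_ediv_of_pos (by omega)]; omega
  · omega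

def solution (n : Int) : Int := solutionGo n 0

-- ===== PORT B =====
-- B's while loop; the `n ≤ 0` guard likewise merges Python's exit `n == 0`
-- with n < 0, where Python's loop never terminates (excluded by Pre_solution).
def solutionAltGo (n result : Int) : Int :=
  if h : n ≤ 0 then result
  else solutionAltGo (PySem.Int.band n (n - 1)) (result + 1)
termination_by n.toNat
decreasing_by
  rw [PySem.Int.band_of_nonneg (by omega) (by omega)]
  have : n.toNat &&& (n - 1).toNat ≤ (n - 1).toNat := Nat.and_le_right
  omega

def solution_alt (n : Int) : Int := solutionAltGo n 0

-- ===== PRECONDITION & SPEC =====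
-- A's loop never terminates for n < 0 (num oscillates below zero), so Pre_ is exactly n ≥ 0.
def Pre_solution (n : Int) : Prop := 0 ≤ n
instance (n : Int) : Decidable (Pre_solution n) := by unfold Pre_solution; infer_instance
def pvWitness_solution : Int := 6

def Spec_solution (n : Int) (out : Int) : Prop := out = solution_alt n
instance (n : Int) (out : Int) : Decidable (Spec_solution n out) := by unfold Spec_solution; infer_instance

-- ===== CLAIM (what is proved, stated in full; the proofs are below) =====
def Claim_equal_solution : Prop := ∀ (n : Int), Dom_solution n → Pre_solution n → Spec_solution n (solution n)

-- ===== LEMMAS AND PROOFS =====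

-- number of set bits of a natural number
def pop (n : Nat) : Nat :=
  if n = 0 then 0 else pop (n / 2) + n % 2
termination_by n
decreasing_by omega

theorem pop_zero : pop 0 = 0 := by simp [pop]

theorem pop_pos (n : Nat) (h : n ≠ 0) : pop n = pop (n / 2) + n % 2 := by
  rw [pop]; simp [h]

theorem pop_two_mul (j : Nat) : pop (2 * j) = pop j := by
  rcases Nat.eq_zero_or_pos j with h | h
  · simp [h]
  · rw [pop_pos (2 * j) (by omega)]
    have h1 : 2 * j / 2 = j := by omega
    have h2 : 2 * j % 2 = 0 := by omega
    rw [h1, h2]; omega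

theorem pop_two_mul_add_one (j : Nat) : pop (2 * j + 1) = pop j + 1 := by
  rw [pop_pos (2 * j + 1) (by omega)]
  have h1 : (2 * j + 1) / 2 = j := by omega
  have h2 : (2 * j + 1) % 2 = 1 := by omega
  rw [h1, h2]

-- clearing the lowest set bit removes exactly one set bit
theorem pop_land_pred (k : Nat) (hk : 0 < k) : pop (k &&& (k - 1)) + 1 = pop k := by
  induction k using Nat.strong_induction_on with
  | _ k ih =>
    rcases Nat.even_or_odd k with ⟨j, hj⟩ | ⟨j, hj⟩
    · -- k = 2*j, j > 0 : k &&& (k-1) = 2*(j &&& (j-1))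
      have hj0 : 0 < j := by omega
      have hb : k &&& (k - 1) = 2 * (j &&& (j - 1)) := by
        have e1 : k = Nat.bit false j := by simp [Nat.bit]; omega
        have e2 : k - 1 = Nat.bit true (j - 1) := by simp [Nat.bit]; omega
        rw [e2, e1, Nat.land_bit]; simp [Nat.bit]
      have hj2 : k = 2 * j := by omega
      rw [hb, hj2, pop_two_mul, pop_two_mul]
      have := ih j (by omega) hj0
      omega
    · -- k = 2*j + 1 : k &&& (k-1) = 2*j, no induction needed
      have hb : k &&& (k - 1) = 2 * j := by
        have e1 : k = Nat.bit true j := by simp [Nat.bit]; omega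
        have e2 : k - 1 = Nat.bit false j := by simp [Nat.bit]; omega
        rw [e2, e1, Nat.land_bit]; simp [Nat.bit]
      rw [hb, pop_two_mul, hj, pop_two_mul_add_one]

theorem solutionGo_eq (m : Nat) : ∀ r : Int, solutionGo (m : Int) r = r + pop m := by
  induction m using Nat.strong_induction_on with
  | _ m ih =>
    intro r
    rcases Nat.eq_zero_or_pos m with h0 | h0
    · subst h0; rw [solutionGo]; simp [pop_zero]
    · rw [solutionGo]
      have hg : ¬ ((m : Int) ≤ 0) := by omega
      rw [if_neg hg]
      rcases Nat.even_or_odd m with ⟨j, hj⟩ | ⟨j, hj⟩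
      · -- even branch
        have hm : PySem.Int.mod (m : Int) 2 = ((m % 2 : Nat) : Int) := by
          exact_mod_cast PySem.Int.mod_natCast m 2
        have hm0 : m % 2 = 0 := by omega
        rw [if_pos (by rw [hm, hm0]; rfl)]
        have hd : PySem.Int.floordiv (m : Int) 2 = ((m / 2 : Nat) : Int) := by
          exact_mod_cast PySem.Int.floordiv_natCast m 2
        rw [hd, ih (m / 2) (by omega) r]
        rw [pop_pos m (by omega), hm0]; omega
      · -- odd branch
        have hm : PySem.Int.mod (m : Int) 2 = ((m % 2 : Nat) : Int) := by
          exact_mod_cast PySem.Int.mod_natCast m 2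
        have hm1 : m % 2 = 1 := by omega
        rw [if_neg (by rw [hm, hm1]; decide)]
        have hc : (m : Int) - 1 = ((m - 1 : Nat) : Int) := by omega
        rw [hc, ih (m - 1) (by omega) (r + 1)]
        have : pop m = pop (m - 1) + 1 := by
          have hme : m - 1 = 2 * j := by omega
          have hmo : m = 2 * j + 1 := by omega
          rw [hme, hmo, pop_two_mul, pop_two_mul_add_one]
        omega

theorem solutionAltGo_eq (m : Nat) : ∀ r : Int, solutionAltGo (m : Int) r = r + pop m := by
  induction m using Nat.strong_induction_on with
  | _ m ih =>
    intro r
    rcases Nat.eq_zero_or_pos m with h0 | h0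
    · subst h0; rw [solutionAltGo]; simp [pop_zero]
    · rw [solutionAltGo]
      have hg : ¬ ((m : Int) ≤ 0) := by omega
      rw [dif_neg hg]
      have hc : (m : Int) - 1 = ((m - 1 : Nat) : Int) := by omega
      rw [hc, PySem.Int.band_natCast]
      have hlt : m &&& (m - 1) < m := by
        have : m &&& (m - 1) ≤ m - 1 := Nat.and_le_right
        omega
      rw [ih (m &&& (m - 1)) hlt (r + 1)]
      have := pop_land_pred m h0
      omega

-- ===== VERDICT (by name: the statement is the Claim_ definition above) =====
theorem solution_spec : Claim_equal_solution := by
  intro n _ hpre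
  have hp : 0 ≤ n := hpre
  unfold Spec_solution solution solution_alt
  have hn : n = ((n.toNat : Nat) : Int) := by omega
  rw [hn, solutionGo_eq, solutionAltGo_eq]
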